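-- pv_equiv track=rewrite | github.com/bulatmain/desrete_analysis_labs | lab4/getTest.py | lineifyTest
-- ===== SOURCE A (Python) =====
-- from bisect import bisect_right
--
-- def lineifyTest(linePositions, patternPositions):
--     linedPatternPositions = []
--     for position in patternPositions:
--         nextLineIndex = bisect_right(linePositions, position)
--         currentLineIndex = nextLineIndex - 1
--         linedPatternPositions.append([
--             currentLineIndex + 1,
--             position - linePositions[currentLineIndex] + 1
--         ])
--     return linedPatternPositions
-- ===== SOURCE B (Python) =====
-- def locate(segment, x):
--     if not segment:
--         return 0
--     mid = len(segment) // 2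
--     if x < segment[mid]:
--         return locate(segment[:mid], x)
--     return mid + 1 + locate(segment[mid + 1:], x)
--
-- def lineify(linePositions, position):
--     line = locate(linePositions, position)
--     return [line, position - linePositions[line - 1] + 1]
--
-- def lineifyTest(linePositions, patternPositions):
--     return [lineify(linePositions, position) for position in patternPositions]
-- ===== Notes on version B (the rewrite author's own statement) =====
-- stated objective: alternative
-- what changed: Replaces the library bisect_right (an in-place lo/hi while-loop) with a recursive divide-and-conquer on list slices that halves the segment at each step, and replaces the loop-and-append accumulation with a per-position helper mapped over patternPositions by a comprehension.
import Mathlib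
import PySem

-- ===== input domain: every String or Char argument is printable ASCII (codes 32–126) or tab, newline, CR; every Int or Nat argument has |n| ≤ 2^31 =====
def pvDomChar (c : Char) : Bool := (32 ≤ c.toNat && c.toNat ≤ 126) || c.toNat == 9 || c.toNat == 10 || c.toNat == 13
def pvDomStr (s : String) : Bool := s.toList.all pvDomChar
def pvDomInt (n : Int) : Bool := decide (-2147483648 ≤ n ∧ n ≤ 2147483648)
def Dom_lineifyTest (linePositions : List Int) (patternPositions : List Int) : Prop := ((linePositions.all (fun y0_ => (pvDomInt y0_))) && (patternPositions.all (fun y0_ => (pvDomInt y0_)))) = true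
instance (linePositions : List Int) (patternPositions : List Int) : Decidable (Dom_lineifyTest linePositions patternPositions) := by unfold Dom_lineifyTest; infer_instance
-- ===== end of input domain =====

-- B replaces the library bisect_right lo/hi loop with a recursive divide-and-conquer on
-- list slices and a mapped per-position helper; same results, no speed claimed.

-- ===== PORT A =====
-- transliteration of CPython's bisect_right(a, x, lo=0, hi=len(a)); under Pre_ the
-- index mid is always in range, so pyGetD's default 0 is never used
def bisectRight (a : List Int) (x : Int) (lo hi : Int) : Int :=
  if h : lo < hi then
    let mid := PySem.Int.floordiv (lo + hi) 2
    if x < PySem.List.pyGetD a mid 0 then bisectRight a x lo mid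
    else bisectRight a x (mid + 1) hi
  else lo
termination_by (hi - lo).toNat
decreasing_by
  · have := (PySem.Int.floordiv_lt_iff_lt_mul (a := lo + hi) (b := 2) (q := hi) (by omega)).mpr (by omega)
    omega
  · have := PySem.Int.floordiv_two_mid_bounds (le_of_lt h)
    omega

-- under Pre_, currentLineIndex ∈ [-1, len-1] with linePositions nonempty whenever a
-- position exists, so pyGetD's default 0 is never used (Python raises only on the
-- empty-linePositions case that Pre_ excludes)
def lineifyTest (linePositions : List Int) (patternPositions : List Int) : List (List Int) :=
  patternPositions.foldl
    (fun linedPatternPositions position =>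
      let nextLineIndex := bisectRight linePositions position 0 linePositions.length
      let currentLineIndex := nextLineIndex - 1
      linedPatternPositions ++
        [[currentLineIndex + 1,
          position - PySem.List.pyGetD linePositions currentLineIndex 0 + 1]]) []

-- ===== PORT B =====
-- B's slices segment[:mid] and segment[mid+1:] have in-range non-negative bounds,
-- so they are exactly List.take mid / List.drop (mid+1)
def locate (segment : List Int) (x : Int) : Int :=
  if hseg : segment = [] then 0
  else
    let mid : Nat := segment.length / 2
    if x < PySem.List.pyGetD segment (mid : Int) 0 then locate (segment.take mid) x
    else (mid : Int) + 1 + locate (segment.drop (mid + 1)) x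
termination_by segment.length
decreasing_by
  · have : segment.length ≠ 0 := fun h => hseg (List.eq_nil_of_length_eq_zero h)
    simp [List.length_take]; omega
  · have : segment.length ≠ 0 := fun h => hseg (List.eq_nil_of_length_eq_zero h)
    simp [List.length_drop]; omega

def lineify (linePositions : List Int) (position : Int) : List Int :=
  let line := locate linePositions position
  [line, position - PySem.List.pyGetD linePositions (line - 1) 0 + 1]

def lineifyTest_alt (linePositions : List Int) (patternPositions : List Int) : List (List Int) :=
  patternPositions.map (fun position => lineify linePositions position)

-- ===== PRECONDITION & SPEC =====
-- Pre_ excludes only the inputs where Python A raises IndexError: an empty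
-- linePositions together with a nonempty patternPositions (Python B raises there too).
def Pre_lineifyTest (linePositions : List Int) (patternPositions : List Int) : Prop :=
  patternPositions = [] ∨ linePositions ≠ []
instance (linePositions : List Int) (patternPositions : List Int) : Decidable (Pre_lineifyTest linePositions patternPositions) := by unfold Pre_lineifyTest; infer_instance

def pvWitness_lineifyTest : List Int × List Int := ([0, 10, 20], [3, 12, 0, 25, 10])

def Spec_lineifyTest (linePositions : List Int) (patternPositions : List Int) (out : List (List Int)) : Prop := out = lineifyTest_alt linePositions patternPositions
instance (linePositions : List Int) (patternPositions : List Int) (out : List (List Int)) : Decidable (Spec_lineifyTest linePositions patternPositions out) := by unfold Spec_lineifyTest; infer_instance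

-- ===== CLAIM (what is proved, stated in full; the proofs are below) =====
def Claim_equal_lineifyTest : Prop := ∀ (linePositions : List Int) (patternPositions : List Int), Dom_lineifyTest linePositions patternPositions → Pre_lineifyTest linePositions patternPositions → Spec_lineifyTest linePositions patternPositions (lineifyTest linePositions patternPositions)

-- ===== LEMMAS AND PROOFS =====

-- bisectRight on the window [lo, hi) equals lo plus locate on the slice a[lo:hi]:
-- both probe the same midpoints, since lo + (hi-lo)//2 = (lo+hi)//2
theorem bisectRight_eq_locate (a : List Int) (x : Int) :
    ∀ (fuel : Nat) (lo hi : Int), 0 ≤ lo → lo ≤ hi → hi ≤ a.length → (hi - lo).toNat ≤ fuel →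
      bisectRight a x lo hi = lo + locate ((a.drop lo.toNat).take (hi - lo).toNat) x := by
  intro fuel
  induction fuel with
  | zero =>
    intro lo hi h0 hle hhi hf
    have heq : hi = lo := by omega
    rw [bisectRight, locate]
    simp [heq]
  | succ m ih =>
    intro lo hi h0 hle hhi hf
    by_cases h : lo < hi
    · set ℓ : Nat := (hi - lo).toNat with hℓ
      have hℓpos : 0 < ℓ := by omega
      set s : List Int := (a.drop lo.toNat).take ℓ with hs
      have hslen : s.length = ℓ := by
        simp [hs, List.length_take, List.length_drop]; omega
      have hsne : s ≠ [] := by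
        intro hnil; rw [hnil] at hslen; simp at hslen; omega
      have hmid : PySem.Int.floordiv (lo + hi) 2 = lo + ((ℓ / 2 : Nat) : Int) := by
        rw [PySem.Int.floordiv_eq_iff_of_pos (by norm_num)]
        push_cast
        omega
      have hm2 : ℓ / 2 < ℓ := by omega
      have hidx : lo.toNat + ℓ / 2 < a.length := by omega
      have hsel : s[ℓ / 2]'(by omega) = a[lo.toNat + ℓ / 2]'hidx := by
        simp [hs]
      have hga : PySem.List.pyGetD a (lo + ((ℓ / 2 : Nat) : Int)) 0 = a[lo.toNat + ℓ / 2]'hidx := by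
        rw [PySem.List.pyGetD_eq_getElem a 0 (by omega) (by push_cast; omega)]
        congr 1
        omega
      have hgs : PySem.List.pyGetD s ((ℓ / 2 : Nat) : Int) 0 = s[ℓ / 2]'(by omega) := by
        rw [PySem.List.pyGetD_eq_getElem s 0 (by omega) (by rw [hslen]; push_cast; omega)]
        congr 1
      rw [bisectRight, locate]
      simp only [dif_pos h, dif_neg hsne, hmid, hslen, hga, hgs, hsel]
      by_cases hx : x < a[lo.toNat + ℓ / 2]'hidx
      · rw [if_pos hx, if_pos hx]
        have ht : s.take (ℓ / 2)
            = (a.drop lo.toNat).take ((lo + ((ℓ / 2 : Nat) : Int)) - lo).toNat := by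
          rw [hs, List.take_take]
          congr 1
          omega
        rw [ht]
        exact ih lo (lo + ((ℓ / 2 : Nat) : Int)) h0 (by omega) (by omega) (by omega)
      · rw [if_neg hx, if_neg hx]
        have hd : s.drop (ℓ / 2 + 1)
            = (a.drop (lo + ((ℓ / 2 : Nat) : Int) + 1).toNat).take
                (hi - (lo + ((ℓ / 2 : Nat) : Int) + 1)).toNat := by
          rw [hs, List.drop_take, List.drop_drop]
          congr 1
          · omega
          · congr 1
            omega
        rw [hd, ih (lo + ((ℓ / 2 : Nat) : Int) + 1) hi (by omega) (by omega) hhi (by omega)]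
        ring
    · have heq : hi = lo := by omega
      rw [bisectRight, locate]
      simp [heq]

-- A's per-position entry equals B's lineify (take the window to be the whole list)
theorem entry_eq_lineify (lp : List Int) (p : Int) :
    [bisectRight lp p 0 lp.length - 1 + 1,
     p - PySem.List.pyGetD lp (bisectRight lp p 0 lp.length - 1) 0 + 1] = lineify lp p := by
  have hb := bisectRight_eq_locate lp p lp.length 0 lp.length (le_refl 0)
    (by omega) (by omega) (by omega)
  simp only [Int.toNat_zero, List.drop_zero, sub_zero, Int.toNat_natCast,
    List.take_length, zero_add] at hb
  rw [lineify, hb]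
  simp

-- A's loop-and-append accumulation is acc ++ the mapped entries
theorem foldl_entries_eq_map (lp : List Int) :
    ∀ (pp : List Int) (acc : List (List Int)),
      pp.foldl
        (fun linedPatternPositions position =>
          let nextLineIndex := bisectRight lp position 0 lp.length
          let currentLineIndex := nextLineIndex - 1
          linedPatternPositions ++
            [[currentLineIndex + 1,
              position - PySem.List.pyGetD lp currentLineIndex 0 + 1]]) acc
      = acc ++ pp.map (fun position => lineify lp position) := by
  intro pp
  induction pp with
  | nil => intro acc; simp
  | cons q t ih =>
    intro acc
    simp only [List.foldl_cons, List.map_cons]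
    rw [ih, entry_eq_lineify lp q]
    simp

-- ===== VERDICT (by name: the statement is the Claim_ definition above) =====
theorem lineifyTest_spec : Claim_equal_lineifyTest := by
  intro lp pp _ _
  unfold Spec_lineifyTest lineifyTest lineifyTest_alt
  rw [foldl_entries_eq_map lp pp []]
  simp
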